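-- pv_equiv track=rewrite | github.com/pyfca/pyfca | pyfca/implications.py | A012
-- ===== SOURCE A (Python) =====
-- Awidth = lambda n: 2**n
--
-- def A012(t,i):
--     if i<0:
--         return ""
--     nA = Awidth(i)
--     if t < nA:
--         return "0"+A012(t,i-1)
--     else:
--         return "2"+A012(t-nA,i-1)
-- ===== SOURCE B (Python) =====
-- def A012(t, i):
--     if i < 0:
--         return ""
--     m = min(max(t, 0), 2 ** (i + 1) - 1)
--     return format(m, '0{}b'.format(i + 1)).replace('1', '2')
-- ===== Notes on version B (the rewrite author's own statement) =====
-- stated objective: simpler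
-- what changed: Replaces the per-position greedy recursion with a closed form: clamp t into [0, 2^(i+1)-1] and render its (i+1)-bit binary representation with 1-bits written as '2'.
import Mathlib
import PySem

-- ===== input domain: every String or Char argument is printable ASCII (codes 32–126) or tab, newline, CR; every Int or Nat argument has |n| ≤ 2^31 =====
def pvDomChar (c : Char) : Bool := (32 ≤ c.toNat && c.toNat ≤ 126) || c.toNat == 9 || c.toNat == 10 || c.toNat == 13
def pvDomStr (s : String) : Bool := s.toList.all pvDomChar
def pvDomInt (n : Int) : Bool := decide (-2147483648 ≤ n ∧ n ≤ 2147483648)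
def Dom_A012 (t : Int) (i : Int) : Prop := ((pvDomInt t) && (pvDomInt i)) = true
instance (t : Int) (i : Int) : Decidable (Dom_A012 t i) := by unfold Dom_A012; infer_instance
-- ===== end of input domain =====

-- B replaces A's high-to-low greedy recursion by a closed form: clamp t into
-- [0, 2^(i+1)-1] and format it as an (i+1)-digit binary string with 1-bits written as '2'.


-- ===== PORT A =====
-- literal transliteration of A: guard i<0, nA = Awidth(i) = 2**i (inlined), branch on
-- t < nA, prepend the digit.  (i ≥ 0 on the non-guard path, hence 2 ^ i.toNat is exact.)
def A012 (t : Int) (i : Int) : String :=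
  if h : i < 0 then ""
  else if t < 2 ^ i.toNat then "0" ++ A012 t (i - 1)
  else "2" ++ A012 (t - 2 ^ i.toNat) (i - 1)
termination_by (i + 1).toNat
decreasing_by all_goals (rename_i hx; clear hx; omega)

-- ===== PORT B =====
-- port of format(m, '0wb') for 0 ≤ m < 2^w: w binary digits, least-significant emitted last
def binChars (m : Nat) (w : Nat) : List Char :=
  match w with
  | 0 => []
  | w + 1 => binChars (m / 2) w ++ [if m % 2 == 1 then '1' else '0']

-- port of Source B: guard, clamp m into [0, 2^(i+1)-1], binary-format, then .replace('1','2')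
def A012_alt (t : Int) (i : Int) : String :=
  if i < 0 then ""
  else String.ofList
    ((binChars (min (max t 0) (2 ^ (i + 1).toNat - 1)).toNat ((i + 1).toNat)).map
      (fun c => if c == '1' then '2' else c))

-- ===== PRECONDITION & SPEC =====
-- Pre_ excludes deep recursion: CPython raises RecursionError on A once i exceeds the
-- interpreter's recursion limit; the fixed bound 900 stays below the default limit, and also
-- excludes a band of deep inputs on which A still returns — B returns the same value there.
def Pre_A012 (t : Int) (i : Int) : Prop := i ≤ 900
instance (t : Int) (i : Int) : Decidable (Pre_A012 t i) := by unfold Pre_A012; infer_instance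
def pvWitness_A012 : Int × Int := (5, 3)

def Spec_A012 (t : Int) (i : Int) (out : String) : Prop := out = A012_alt t i
instance (t : Int) (i : Int) (out : String) : Decidable (Spec_A012 t i out) := by unfold Spec_A012; infer_instance

-- ===== CLAIM (what is proved, stated in full; the proofs are below) =====
def Claim_equal_A012 : Prop := ∀ (t : Int) (i : Int), Dom_A012 t i → Pre_A012 t i → Spec_A012 t i (A012 t i)

-- ===== LEMMAS AND PROOFS =====

-- high-digit decomposition of the low-to-high formatter, for in-range m
theorem binChars_high (w m : Nat) (hm : m < 2 ^ (w + 1)) :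
    binChars m (w + 1) =
      if m < 2 ^ w then '0' :: binChars m w else '1' :: binChars (m - 2 ^ w) w := by
  induction w generalizing m with
  | zero => interval_cases m <;> decide
  | succ w ih =>
    have hps : (2:Nat) ^ (w + 1 + 1) = 2 * 2 ^ (w + 1) := by ring
    have hps' : (2:Nat) ^ (w + 1) = 2 * 2 ^ w := by ring
    have h2 : m / 2 < 2 ^ (w + 1) := by omega
    show binChars (m / 2) (w + 1) ++ [if m % 2 == 1 then '1' else '0'] = _
    rw [ih (m / 2) h2]
    by_cases hd : m < 2 ^ (w + 1)
    · have : m / 2 < 2 ^ w := by omega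
      rw [if_pos this, if_pos hd]
      rfl
    · have h1 : ¬ m / 2 < 2 ^ w := by omega
      rw [if_neg h1, if_neg hd]
      show '1' :: (binChars (m / 2 - 2 ^ w) w ++ _)
          = '1' :: (binChars ((m - 2 ^ (w + 1)) / 2) w ++ [if (m - 2 ^ (w + 1)) % 2 == 1 then '1' else '0'])
      have e1 : m / 2 - 2 ^ w = (m - 2 ^ (w + 1)) / 2 := by omega
      have e2 : (m - 2 ^ (w + 1)) % 2 = m % 2 := by omega
      rw [e1, e2]

theorem ofList_cons_append (c : Char) (l : List Char) :
    String.ofList [c] ++ String.ofList l = String.ofList (c :: l) :=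
  (String.ofList_append).symm

theorem A012_closed (n : Nat) (t : Int) :
    A012 t (n : Int) =
      String.ofList ((binChars (min (max t 0) (2 ^ (n + 1) - 1)).toNat (n + 1)).map
        (fun c => if c == '1' then '2' else c)) := by
  induction n generalizing t with
  | zero =>
    rw [A012, dif_neg (by omega)]
    simp only [Int.toNat_natCast, pow_zero, zero_add, pow_one]
    by_cases ht : t < 1
    · rw [if_pos ht, A012, dif_pos (by omega)]
      have hm : (min (max t 0) (2 - 1)).toNat = 0 := by omega
      rw [hm]; decide
    · rw [if_neg ht, A012, dif_pos (by omega)]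
      have hm : (min (max t 0) (2 - 1)).toNat = 1 := by omega
      rw [hm]; decide
  | succ n ih =>
    rw [A012, dif_neg (by omega)]
    simp only [Int.toNat_natCast]
    have hk : (0:Nat) < 2 ^ (n + 1) := Nat.two_pow_pos _
    have hki : ((2:Int) ^ (n + 1)) = ((2 ^ (n + 1) : Nat) : Int) := by push_cast; ring
    have h2i : ((2:Int) ^ (n + 1 + 1)) = 2 * ((2 ^ (n + 1) : Nat) : Int) := by push_cast; ring
    have hc : ((n + 1 : Nat) : Int) - 1 = (n : Int) := by push_cast; ring
    simp only [hki] at ih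
    rw [hki, hc, h2i]
    have hps : (2:Nat) ^ (n + 1 + 1) = 2 * 2 ^ (n + 1) := by ring
    by_cases ht : t < ((2 ^ (n + 1) : Nat) : Int)
    · rw [if_pos ht, ih]
      have hm2 : (min (max t 0) (2 * ((2 ^ (n + 1) : Nat) : Int) - 1)).toNat < 2 ^ (n + 1 + 1) := by
        omega
      rw [binChars_high (n + 1) _ hm2,
        if_pos (show (min (max t 0) (2 * ((2 ^ (n + 1) : Nat) : Int) - 1)).toNat < 2 ^ (n + 1) by omega)]
      have hmm : (min (max t 0) (2 * ((2 ^ (n + 1) : Nat) : Int) - 1)).toNat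
          = (min (max t 0) (((2 ^ (n + 1) : Nat) : Int) - 1)).toNat := by omega
      rw [hmm, List.map_cons]
      rw [show ("0" : String) = String.ofList ['0'] from rfl]
      rw [ofList_cons_append]
      rfl
    · rw [if_neg ht, ih]
      have hm2 : (min (max t 0) (2 * ((2 ^ (n + 1) : Nat) : Int) - 1)).toNat < 2 ^ (n + 1 + 1) := by
        omega
      rw [binChars_high (n + 1) _ hm2,
        if_neg (show ¬ (min (max t 0) (2 * ((2 ^ (n + 1) : Nat) : Int) - 1)).toNat < 2 ^ (n + 1) by omega)]
      have hmm : (min (max t 0) (2 * ((2 ^ (n + 1) : Nat) : Int) - 1)).toNat - 2 ^ (n + 1)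
          = (min (max (t - ((2 ^ (n + 1) : Nat) : Int)) 0) (((2 ^ (n + 1) : Nat) : Int) - 1)).toNat := by
        omega
      rw [hmm, List.map_cons]
      rw [show ("2" : String) = String.ofList ['2'] from rfl]
      rw [ofList_cons_append]
      rfl

-- ===== VERDICT (by name: the statement is the Claim_ definition above) =====
theorem A012_spec : Claim_equal_A012 := by
  intro t i _ _
  unfold Spec_A012 A012_alt
  by_cases hi : i < 0
  · rw [if_pos hi, A012, dif_pos hi]
  · rw [if_neg hi]
    have hw : (i + 1).toNat = i.toNat + 1 := by omega
    have hn : i = ((i.toNat : Nat) : Int) := by omega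
    rw [hw]
    conv_lhs => rw [hn]
    exact A012_closed i.toNat t
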